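-- pv_equiv track=rewrite | github.com/pawang1745/65-Days-Problem-Solving | Day-29/Extract Maximum.py | extractMaximum
-- ===== SOURCE A (Python) =====
-- def extractMaximum(S):
--   max_value = -1
--   current_num = ""
--
--   for char in S:
--     # Check if character is a digit
--     if char.isdigit():
--       current_num += char
--     # If not a digit or end of string, convert current number and update max
--     else:
--       if current_num:
--         max_value = max(max_value, int(current_num))
--         current_num = ""
--
--   # Check for last number at the end of string
--   if current_num:
--     max_value = max(max_value, int(current_num))
--
--   return max_value
-- ===== SOURCE B (Python) =====
-- def extractMaximum(S):
--   # blank out every non-digit, then the digit runs are exactly the words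
--   cleaned = "".join(c if c.isdigit() else " " for c in S)
--   return max([-1] + [int(w) for w in cleaned.split()])
-- ===== Notes on version B (the rewrite author's own statement) =====
-- stated objective: idiomatic
-- what changed: Replaces the stateful character loop with running max and pending-digits buffer by a translate-then-split pipeline: non-digits become spaces, str.split() yields the digit runs, and a single max over [-1]+values gives the answer.
import Mathlib
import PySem

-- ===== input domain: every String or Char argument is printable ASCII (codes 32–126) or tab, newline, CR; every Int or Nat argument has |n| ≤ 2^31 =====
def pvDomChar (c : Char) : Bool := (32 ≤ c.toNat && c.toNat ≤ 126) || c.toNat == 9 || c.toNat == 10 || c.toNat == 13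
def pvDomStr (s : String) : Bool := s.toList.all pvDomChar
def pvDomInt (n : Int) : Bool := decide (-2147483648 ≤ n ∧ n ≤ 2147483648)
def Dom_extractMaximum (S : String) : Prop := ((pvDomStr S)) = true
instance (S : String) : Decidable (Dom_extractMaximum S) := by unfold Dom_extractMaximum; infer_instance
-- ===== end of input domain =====

-- B replaces A's stateful running-max loop by translate-non-digits-to-spaces + split + one max (idiomatic, same cost).

-- shared helper: int() of a digit run; exact here because both programs only apply
-- int() to nonempty all-digit strings, on which int() cannot raise
def pvVal (g : List Char) : Int := (PySem.Int.ofChars? g).getD 0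

-- ===== PORT A =====
def pvStepA (st : Int × List Char) (c : Char) : Int × List Char :=
  if PySem.Chars.isdigit c then (st.1, st.2 ++ [c])
  else if st.2.isEmpty then st else (max st.1 (pvVal st.2), [])

def extractMaximum (S : String) : Int :=
  let fin := S.toList.foldl pvStepA (-1, [])
  if fin.2.isEmpty then fin.1 else max fin.1 (pvVal fin.2)

-- ===== PORT B =====
def extractMaximum_alt (S : String) : Int :=
  let cleaned := S.toList.map (fun c => if PySem.Chars.isdigit c then c else ' ')
  let words := PySem.Chars.split₀ cleaned
  -- max() of a nonempty list always returns; .getD 0 is unreachable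
  (PySem.List.max? ((-1) :: words.map pvVal) (fun x => x)).getD 0

-- ===== PRECONDITION & SPEC =====
def Spec_extractMaximum (S : String) (out : Int) : Prop := out = extractMaximum_alt S
instance (S : String) (out : Int) : Decidable (Spec_extractMaximum S out) := by unfold Spec_extractMaximum; infer_instance

-- ===== CLAIM (what is proved, stated in full; the proofs are below) =====
def Claim_equal_extractMaximum : Prop := ∀ (S : String), Dom_extractMaximum S → Spec_extractMaximum S (extractMaximum S)

-- ===== LEMMAS AND PROOFS =====

-- the digit runs of s, with pending run cur
def pvRuns : List Char → List Char → List (List Char)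
  | cur, [] => if cur.isEmpty then [] else [cur]
  | cur, c :: t =>
      if PySem.Chars.isdigit c then pvRuns (cur ++ [c]) t
      else if cur.isEmpty then pvRuns [] t else cur :: pvRuns [] t

lemma pv_isspace_of_isdigit {c : Char} (h : PySem.Chars.isdigit c = true) :
    PySem.Chars.isspace c = false := by
  simp only [PySem.Chars.isdigit, Bool.and_eq_true, decide_eq_true_eq, Char.le_def,
    UInt32.le_iff_toNat_le] at h
  have h0 : ('0').val.toNat = 48 := rfl
  have h9 : ('9').val.toNat = 57 := rfl
  simp only [PySem.Chars.isspace, Char.toNat]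
  simp only [Bool.or_eq_false_iff, Bool.and_eq_false_iff, decide_eq_false_iff_not]
  omega

lemma pv_foldA : ∀ (s : List Char) (m : Int) (cur : List Char),
    (let fin := s.foldl pvStepA (m, cur);
     if fin.2.isEmpty then fin.1 else max fin.1 (pvVal fin.2))
      = ((pvRuns cur s).map pvVal).foldl max m := by
  intro s
  induction s with
  | nil =>
    intro m cur
    simp only [List.foldl, pvRuns]
    cases cur <;> simp
  | cons c t ih =>
    intro m cur
    simp only [List.foldl, pvRuns, pvStepA]
    by_cases hd : PySem.Chars.isdigit c = true
    · simp only [hd, if_pos]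
      exact ih m (cur ++ [c])
    · simp only [hd, if_neg, Bool.false_eq_true, not_false_iff]
      by_cases he : cur.isEmpty
      · simp only [he, if_pos]
        have := ih m cur
        cases cur <;> simp_all
      · simp only [he]
        have := ih (max m (pvVal cur)) []
        simp only [] at *
        exact this

lemma pv_go : ∀ (s : List Char) (cur : List Char) (acc : List (List Char)),
    PySem.Chars.split₀.go (s.map (fun c => if PySem.Chars.isdigit c then c else ' ')) cur acc
      = acc.reverse ++ pvRuns cur.reverse s := by
  intro s
  induction s with
  | nil =>
    intro cur acc
    simp only [List.map, PySem.Chars.split₀.go, pvRuns]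
    by_cases he : cur.isEmpty
    · simp [List.isEmpty_iff.mp he]
    · have : cur.reverse.isEmpty = false := by
        cases cur <;> simp_all
      simp [he, this]
  | cons c t ih =>
    intro cur acc
    simp only [List.map]
    by_cases hd : PySem.Chars.isdigit c = true
    · have hs : PySem.Chars.isspace c = false := pv_isspace_of_isdigit hd
      simp only [hd, if_pos, PySem.Chars.split₀.go, hs, Bool.false_eq_true, if_false, pvRuns]
      have := ih (c :: cur) acc
      simpa using this
    · have hs : PySem.Chars.isspace ' ' = true := by decide
      simp only [hd, Bool.false_eq_true, if_false, PySem.Chars.split₀.go, hs, if_pos, pvRuns]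
      by_cases he : cur.isEmpty
      · have : cur.reverse.isEmpty = true := by cases cur <;> simp_all
        simp [he, this, ih [] acc]
      · have h2 : cur.reverse.isEmpty = false := by cases cur <;> simp_all
        simp [he, h2, ih [] (cur.reverse :: acc)]

-- ===== VERDICT (by name: the statement is the Claim_ definition above) =====
theorem extractMaximum_spec : Claim_equal_extractMaximum := by
  intro S _
  unfold Spec_extractMaximum extractMaximum extractMaximum_alt PySem.Chars.split₀
  have hB := pv_go S.toList [] []
  simp only [List.reverse_nil, List.nil_append] at hB
  simp only [hB, PySem.List.max?_id_cons, Option.getD_some]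
  simpa using pv_foldA S.toList (-1) []
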